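-- pv_equiv track=rewrite | github.com/elenafillo/extract_iris_met | check_met_files.py | summarise_complete_by_year
-- ===== SOURCE A (Python) =====
-- from collections import defaultdict, Counter
--
-- def summarise_complete_by_year(complete_months):
--     yearly_summary = defaultdict(set)
--     for region, yearmonth in complete_months:
--         year = yearmonth[:4]
--         yearly_summary[(region, year)].add(yearmonth)
--     complete_sets = defaultdict(set)
--     for (region, year), months in yearly_summary.items():
--         if len(months) == 12:
--             complete_sets[region].add(year)
--     return complete_sets
-- ===== SOURCE B (Python) =====
-- from collections import defaultdict
--
-- def summarise_complete_by_year(complete_months):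
--     # distinct (region, year) keys in first-occurrence order
--     keys = list(dict.fromkeys((region, yearmonth[:4]) for region, yearmonth in complete_months))
--     complete_sets = defaultdict(set)
--     for region, year in keys:
--         months = {ym for r, ym in complete_months if r == region and ym[:4] == year}
--         if len(months) == 12:
--             complete_sets[region].add(year)
--     return complete_sets
-- ===== Notes on version B (the rewrite author's own statement) =====
-- stated objective: alternative
-- what changed: Replaces A's incremental dict-of-sets grouping pass by a one-shot ordered dedup of (region, year) keys followed by a per-key set comprehension that rescans the input to collect that key's distinct months.
import Mathlib
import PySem

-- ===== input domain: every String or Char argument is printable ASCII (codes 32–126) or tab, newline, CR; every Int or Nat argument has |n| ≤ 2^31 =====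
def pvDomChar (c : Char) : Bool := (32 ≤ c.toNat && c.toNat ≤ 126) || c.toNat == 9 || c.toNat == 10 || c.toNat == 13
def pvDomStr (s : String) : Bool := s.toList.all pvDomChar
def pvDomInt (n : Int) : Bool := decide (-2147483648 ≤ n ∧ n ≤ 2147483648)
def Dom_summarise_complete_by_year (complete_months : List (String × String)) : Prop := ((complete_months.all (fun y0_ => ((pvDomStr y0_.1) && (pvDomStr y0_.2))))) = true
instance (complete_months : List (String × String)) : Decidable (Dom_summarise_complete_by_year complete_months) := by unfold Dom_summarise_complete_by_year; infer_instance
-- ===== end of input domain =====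

-- B replaces A's incremental dict-of-sets grouping by an ordered dedup of the (region, year)
-- keys followed by a per-key rescan collecting that key's distinct months (alternative decomposition).

-- ===== PORT A =====
-- yearmonth[:4]
def pvYear4 (s : String) : String := PySem.Str.slice s none (some 4)
-- the (region, year) pair both programs form from an input pair
def pvKey (p : String × String) : String × String := (p.1, pvYear4 p.2)

def summarise_complete_by_year (complete_months : List (String × String)) : List (String × List String) :=
  -- yearly_summary = defaultdict(set); yearly_summary[(region, year)].add(yearmonth)
  let yearly_summary : PySem.Dict (String × String) (PySem.Set String) :=
    complete_months.foldl
      (fun d p => d.modify (pvKey p) PySem.Set.empty (fun s => PySem.Set.add s p.2))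
      PySem.Dict.empty
  -- complete_sets = defaultdict(set); for (region, year), months in yearly_summary.items(): …
  let complete_sets : PySem.Dict String (PySem.Set String) :=
    yearly_summary.items.foldl
      (fun c it =>
        if it.2.length == 12 then
          c.modify it.1.1 PySem.Set.empty (fun s => PySem.Set.add s it.1.2)
        else c)
      PySem.Dict.empty
  complete_sets.items

-- ===== PORT B =====
def summarise_complete_by_year_alt (complete_months : List (String × String)) : List (String × List String) :=
  -- keys = list(dict.fromkeys((region, yearmonth[:4]) for …))
  let keys : List (String × String) :=
    PySem.List.dedup (complete_months.map pvKey)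
  let complete_sets : PySem.Dict String (PySem.Set String) :=
    keys.foldl
      (fun c k =>
        -- months = {ym for r, ym in complete_months if r == region and ym[:4] == year}
        let months : PySem.Set String :=
          PySem.Set.ofList
            ((complete_months.filter (fun q => q.1 == k.1 && pvYear4 q.2 == k.2)).map (·.2))
        if months.length == 12 then
          c.modify k.1 PySem.Set.empty (fun s => PySem.Set.add s k.2)
        else c)
      PySem.Dict.empty
  complete_sets.items

-- ===== PRECONDITION & SPEC =====
def Spec_summarise_complete_by_year (complete_months : List (String × String)) (out : List (String × List String)) : Prop := out = summarise_complete_by_year_alt complete_months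
instance (complete_months : List (String × String)) (out : List (String × List String)) : Decidable (Spec_summarise_complete_by_year complete_months out) := by unfold Spec_summarise_complete_by_year; infer_instance

-- ===== CLAIM =====
def Claim_equal_summarise_complete_by_year : Prop := ∀ (complete_months : List (String × String)), Dom_summarise_complete_by_year complete_months → Spec_summarise_complete_by_year complete_months (summarise_complete_by_year complete_months)

-- ===== LEMMAS AND PROOFS =====

-- the grouping value of A's first loop, computed directly
def pvMonths (l : List (String × String)) (k : String × String) : List String :=
  (l.filter (fun q => pvKey q == k)).map (·.2)

lemma pv_getD_foldl_modify_add (l : List (String × String))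
    (d : PySem.Dict (String × String) (PySem.Set String)) (k : String × String) :
    (l.foldl (fun d p => d.modify (pvKey p) PySem.Set.empty (fun s => PySem.Set.add s p.2)) d).getD k PySem.Set.empty
      = PySem.Set.update (d.getD k PySem.Set.empty) (pvMonths l k) := by
  induction l generalizing d with
  | nil => simp [pvMonths, PySem.Set.update_nil]
  | cons p l ih =>
    simp only [List.foldl_cons, ih, pvMonths, List.filter_cons]
    by_cases h : pvKey p = k
    · simp [h, PySem.Set.update_cons]
    · have hb : (pvKey p == k) = false := by simp [h]
      simp [hb, PySem.Dict.getD_modify, Ne.symm h]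

lemma pv_items_first_loop (l : List (String × String)) :
    (l.foldl (fun d p => d.modify (pvKey p) PySem.Set.empty (fun s => PySem.Set.add s p.2)) PySem.Dict.empty).items
      = (PySem.List.dedup (l.map pvKey)).map (fun k => (k, PySem.Set.ofList (pvMonths l k))) := by
  set d := l.foldl (fun d p => d.modify (pvKey p) PySem.Set.empty (fun s => PySem.Set.add s p.2)) PySem.Dict.empty with hd
  have hkeys : d.keys = PySem.List.dedup (l.map pvKey) := by
    rw [hd, PySem.Dict.keys_foldl_modify_key]
    simp [PySem.Set.update, PySem.Set.ofList_eq_foldl, PySem.Dict.keys_empty]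
  have hnd : d.keys.Nodup := by
    rw [hkeys]; exact PySem.List.nodup_dedup _
  rw [PySem.Dict.items_eq_map_keys d hnd PySem.Set.empty, hkeys]
  refine List.map_congr_left (fun k hk => ?_)
  rw [hd, pv_getD_foldl_modify_add]
  simp [PySem.Set.update, PySem.Set.ofList_eq_foldl, PySem.Dict.getD_empty]

-- ===== VERDICT =====
theorem summarise_complete_by_year_spec : Claim_equal_summarise_complete_by_year := by
  intro l _
  unfold Spec_summarise_complete_by_year summarise_complete_by_year summarise_complete_by_year_alt
  dsimp only
  rw [pv_items_first_loop, List.foldl_map]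
  have hfun : ∀ (c : PySem.Dict String (PySem.Set String)) (k : String × String),
      (if (PySem.Set.ofList (pvMonths l k)).length == 12 then
         c.modify k.1 PySem.Set.empty (fun s => PySem.Set.add s k.2) else c)
        = (if (PySem.Set.ofList
                ((l.filter (fun q => q.1 == k.1 && pvYear4 q.2 == k.2)).map (·.2))).length == 12 then
             c.modify k.1 PySem.Set.empty (fun s => PySem.Set.add s k.2) else c) :=
    fun c k => rfl
  exact congrArg (fun f => (List.foldl f (PySem.Dict.empty : PySem.Dict String (PySem.Set String)) (PySem.List.dedup (l.map pvKey))).items) (funext fun c => funext fun k => hfun c k)
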